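-- pv_equiv track=rewrite | github.com/nsfwhubinfo/ProStudio-Tools | core/content_engine/generators/tiktok_generator.py | _analyze_concept
-- ===== SOURCE A (Python) =====
-- from typing import Dict, List, Optional, Any, Tuple
--
-- def _analyze_concept(concept: str) -> Dict[str, Any]:
--     """Analyze concept to determine content strategy"""
--     # Simple keyword analysis for demo
--     # In production, would use NLP and trend analysis
--
--     strategy = {
--         "type": "educational",  # educational, entertainment, motivational, story
--         "emotion": "curiosity",  # curiosity, joy, surprise, inspiration
--         "pacing": "dynamic",     # slow, medium, dynamic, fast
--         "audience": "general",   # general, niche, young, professional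
--         "tone": "friendly"       # friendly, serious, humorous, dramatic
--     }
--
--     # Keyword-based strategy selection
--     concept_lower = concept.lower()
--
--     if any(word in concept_lower for word in ["learn", "how to", "tutorial", "guide"]):
--         strategy["type"] = "educational"
--         strategy["emotion"] = "curiosity"
--     elif any(word in concept_lower for word in ["funny", "comedy", "laugh", "joke"]):
--         strategy["type"] = "entertainment"
--         strategy["emotion"] = "joy"
--         strategy["tone"] = "humorous"
--     elif any(word in concept_lower for word in ["inspire", "motivate", "success", "dream"]):
--         strategy["type"] = "motivational"
--         strategy["emotion"] = "inspiration"
--     elif any(word in concept_lower for word in ["story", "journey", "experience"]):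
--         strategy["type"] = "story"
--         strategy["emotion"] = "surprise"
--
--     return strategy
-- ===== SOURCE B (Python) =====
-- def _analyze_concept(concept: str):
--     """Analyze concept to determine content strategy.
--
--     Each keyword is mapped to a category index; because the original branch
--     chain checks categories in index order with first-match-wins, the selected
--     category is simply the MINIMUM index among all matching keywords (default 0,
--     whose row coincides with the default strategy). The result is then built
--     directly from per-category tables instead of patching a default dict.
--     """
--     cl = concept.lower()
--     KEYWORD_CATEGORY = {
--         "learn": 0, "how to": 0, "tutorial": 0, "guide": 0,
--         "funny": 1, "comedy": 1, "laugh": 1, "joke": 1,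
--         "inspire": 2, "motivate": 2, "success": 2, "dream": 2,
--         "story": 3, "journey": 3, "experience": 3,
--     }
--     cat = min((c for kw, c in KEYWORD_CATEGORY.items() if kw in cl), default=0)
--     TYPES = ("educational", "entertainment", "motivational", "story")
--     EMOTIONS = ("curiosity", "joy", "inspiration", "surprise")
--     return {
--         "type": TYPES[cat],
--         "emotion": EMOTIONS[cat],
--         "pacing": "dynamic",
--         "audience": "general",
--         "tone": "humorous" if cat == 1 else "friendly",
--     }
-- ===== Notes on version B (the rewrite author's own statement) =====
-- stated objective: alternative
-- what changed: Replaces the if/elif chain over keyword groups with a keyword-to-category-index map: the chosen category is the minimum index among matching keywords (first-match-wins equals min because branches are in index order, and the default coincides with row 0), and the result dict is built directly from per-category tables instead of updating a default dict.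
import Mathlib
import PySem

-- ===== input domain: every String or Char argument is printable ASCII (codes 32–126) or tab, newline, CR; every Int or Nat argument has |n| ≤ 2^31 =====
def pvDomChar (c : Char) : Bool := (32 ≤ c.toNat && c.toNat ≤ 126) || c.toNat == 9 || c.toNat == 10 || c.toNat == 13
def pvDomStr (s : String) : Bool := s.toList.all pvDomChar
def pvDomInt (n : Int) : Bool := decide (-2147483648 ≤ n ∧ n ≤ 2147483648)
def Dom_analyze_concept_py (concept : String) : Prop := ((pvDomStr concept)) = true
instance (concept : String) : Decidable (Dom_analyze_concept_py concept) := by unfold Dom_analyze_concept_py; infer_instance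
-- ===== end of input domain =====

-- B replaces the if/elif chain by a keyword→category map, a min over matched category
-- indices and direct construction of the result from category tables; same return value
-- on every input (alternative formulation, not faster).

-- ===== PORT A =====
def analyze_concept_py (concept : String) : List (String × String) :=
  let strategy : PySem.Dict String String := PySem.Dict.ofList
    [("type", "educational"), ("emotion", "curiosity"), ("pacing", "dynamic"),
     ("audience", "general"), ("tone", "friendly")]
  let concept_lower := PySem.Str.lower concept
  let strategy :=
    if (["learn", "how to", "tutorial", "guide"].any fun word => PySem.Str.isIn word concept_lower) then
      (strategy.insert "type" "educational").insert "emotion" "curiosity"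
    else if (["funny", "comedy", "laugh", "joke"].any fun word => PySem.Str.isIn word concept_lower) then
      ((strategy.insert "type" "entertainment").insert "emotion" "joy").insert "tone" "humorous"
    else if (["inspire", "motivate", "success", "dream"].any fun word => PySem.Str.isIn word concept_lower) then
      (strategy.insert "type" "motivational").insert "emotion" "inspiration"
    else if (["story", "journey", "experience"].any fun word => PySem.Str.isIn word concept_lower) then
      (strategy.insert "type" "story").insert "emotion" "surprise"
    else strategy
  strategy.items

-- ===== PORT B =====
-- Source B's KEYWORD_CATEGORY dict, in insertion order
def pvKeywordCategory : List (String × Nat) :=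
  [("learn", 0), ("how to", 0), ("tutorial", 0), ("guide", 0),
   ("funny", 1), ("comedy", 1), ("laugh", 1), ("joke", 1),
   ("inspire", 2), ("motivate", 2), ("success", 2), ("dream", 2),
   ("story", 3), ("journey", 3), ("experience", 3)]

-- the generator '(c for kw, c in KEYWORD_CATEGORY.items() if kw in cl)'
def pvHits (cl : String) : List Nat :=
  (pvKeywordCategory.filter (fun p => PySem.Str.isIn p.1 cl)).map Prod.snd

def analyze_concept_py_alt (concept : String) : List (String × String) :=
  let cl := PySem.Str.lower concept
  -- min(..., default=0)
  let cat : Nat := (PySem.List.min? (pvHits cl) (fun x => x)).getD 0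
  -- TYPES[cat] / EMOTIONS[cat]: cat ∈ {0,1,2,3} always, so getD equals Python's tuple indexing
  [("type", ["educational", "entertainment", "motivational", "story"].getD cat ""),
   ("emotion", ["curiosity", "joy", "inspiration", "surprise"].getD cat ""),
   ("pacing", "dynamic"),
   ("audience", "general"),
   ("tone", if cat == 1 then "humorous" else "friendly")]

-- ===== PRECONDITION & SPEC =====
def Spec_analyze_concept_py (concept : String) (out : List (String × String)) : Prop := out = analyze_concept_py_alt concept
instance (concept : String) (out : List (String × String)) : Decidable (Spec_analyze_concept_py concept out) := by unfold Spec_analyze_concept_py; infer_instance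

-- ===== CLAIM (what is proved, stated in full; the proofs are below) =====
def Claim_equal_analyze_concept_py : Prop := ∀ (concept : String), Dom_analyze_concept_py concept → Spec_analyze_concept_py concept (analyze_concept_py concept)

-- ===== LEMMAS AND PROOFS =====

-- membership in the hits list, per category
theorem mem_pvHits (cl : String) (c : Nat) :
    c ∈ pvHits cl ↔
      (c = 0 ∧ (["learn", "how to", "tutorial", "guide"].any fun w => PySem.Str.isIn w cl) = true) ∨
      (c = 1 ∧ (["funny", "comedy", "laugh", "joke"].any fun w => PySem.Str.isIn w cl) = true) ∨
      (c = 2 ∧ (["inspire", "motivate", "success", "dream"].any fun w => PySem.Str.isIn w cl) = true) ∨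
      (c = 3 ∧ (["story", "journey", "experience"].any fun w => PySem.Str.isIn w cl) = true) := by
  simp only [pvHits, List.mem_map, List.mem_filter, List.any_cons, List.any_nil,
    Bool.or_eq_true, Bool.false_eq_true, or_false]
  constructor
  · rintro ⟨⟨s, n⟩, ⟨hmem, hin⟩, rfl⟩
    simp only [pvKeywordCategory, List.mem_cons, List.not_mem_nil, or_false, Prod.mk.injEq] at hmem
    rcases hmem with ⟨hs, hn⟩ | ⟨hs, hn⟩ | ⟨hs, hn⟩ | ⟨hs, hn⟩ | ⟨hs, hn⟩ | ⟨hs, hn⟩ | ⟨hs, hn⟩ | ⟨hs, hn⟩ | ⟨hs, hn⟩ | ⟨hs, hn⟩ | ⟨hs, hn⟩ | ⟨hs, hn⟩ | ⟨hs, hn⟩ | ⟨hs, hn⟩ | ⟨hs, hn⟩ <;> subst hs <;> subst hn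
    · exact Or.inl ⟨rfl, Or.inl hin⟩
    · exact Or.inl ⟨rfl, Or.inr (Or.inl hin)⟩
    · exact Or.inl ⟨rfl, Or.inr (Or.inr (Or.inl hin))⟩
    · exact Or.inl ⟨rfl, Or.inr (Or.inr (Or.inr (hin)))⟩
    · exact Or.inr (Or.inl ⟨rfl, Or.inl hin⟩)
    · exact Or.inr (Or.inl ⟨rfl, Or.inr (Or.inl hin)⟩)
    · exact Or.inr (Or.inl ⟨rfl, Or.inr (Or.inr (Or.inl hin))⟩)
    · exact Or.inr (Or.inl ⟨rfl, Or.inr (Or.inr (Or.inr (hin)))⟩)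
    · exact Or.inr (Or.inr (Or.inl ⟨rfl, Or.inl hin⟩))
    · exact Or.inr (Or.inr (Or.inl ⟨rfl, Or.inr (Or.inl hin)⟩))
    · exact Or.inr (Or.inr (Or.inl ⟨rfl, Or.inr (Or.inr (Or.inl hin))⟩))
    · exact Or.inr (Or.inr (Or.inl ⟨rfl, Or.inr (Or.inr (Or.inr (hin)))⟩))
    · exact Or.inr (Or.inr (Or.inr (⟨rfl, Or.inl hin⟩)))
    · exact Or.inr (Or.inr (Or.inr (⟨rfl, Or.inr (Or.inl hin)⟩)))
    · exact Or.inr (Or.inr (Or.inr (⟨rfl, Or.inr (Or.inr (hin))⟩)))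
  · rintro (⟨rfl, h⟩ | ⟨rfl, h⟩ | ⟨rfl, h⟩ | ⟨rfl, h⟩)
    · -- category 0
      rcases h with h | h | h | h
      · exact ⟨("learn", 0), ⟨by simp [pvKeywordCategory], h⟩, rfl⟩
      · exact ⟨("how to", 0), ⟨by simp [pvKeywordCategory], h⟩, rfl⟩
      · exact ⟨("tutorial", 0), ⟨by simp [pvKeywordCategory], h⟩, rfl⟩
      · exact ⟨("guide", 0), ⟨by simp [pvKeywordCategory], h⟩, rfl⟩
    · -- category 1
      rcases h with h | h | h | h
      · exact ⟨("funny", 1), ⟨by simp [pvKeywordCategory], h⟩, rfl⟩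
      · exact ⟨("comedy", 1), ⟨by simp [pvKeywordCategory], h⟩, rfl⟩
      · exact ⟨("laugh", 1), ⟨by simp [pvKeywordCategory], h⟩, rfl⟩
      · exact ⟨("joke", 1), ⟨by simp [pvKeywordCategory], h⟩, rfl⟩
    · -- category 2
      rcases h with h | h | h | h
      · exact ⟨("inspire", 2), ⟨by simp [pvKeywordCategory], h⟩, rfl⟩
      · exact ⟨("motivate", 2), ⟨by simp [pvKeywordCategory], h⟩, rfl⟩
      · exact ⟨("success", 2), ⟨by simp [pvKeywordCategory], h⟩, rfl⟩
      · exact ⟨("dream", 2), ⟨by simp [pvKeywordCategory], h⟩, rfl⟩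
    · -- category 3
      rcases h with h | h | h
      · exact ⟨("story", 3), ⟨by simp [pvKeywordCategory], h⟩, rfl⟩
      · exact ⟨("journey", 3), ⟨by simp [pvKeywordCategory], h⟩, rfl⟩
      · exact ⟨("experience", 3), ⟨by simp [pvKeywordCategory], h⟩, rfl⟩

-- if k is a matching category and a lower bound of all matching categories, it is the min
theorem pvMinIs (cl : String) (k : Nat) (hk : k ∈ pvHits cl)
    (hlow : ∀ c ∈ pvHits cl, k ≤ c) :
    (PySem.List.min? (pvHits cl) (fun x => x)).getD 0 = k := by
  cases hm : PySem.List.min? (pvHits cl) (fun x => x) with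
  | none =>
    rw [PySem.List.min?_eq_none_iff] at hm
    rw [hm] at hk; cases hk
  | some m =>
    have h1 : m ∈ pvHits cl := PySem.List.min?_mem hm
    have h2 : m ≤ k := PySem.List.min?_isMin hm k hk
    have h3 : k ≤ m := hlow m h1
    simp
    omega

-- the selected category equals A's first-matching branch index
theorem cat_eq (cl : String) :
    (PySem.List.min? (pvHits cl) (fun x => x)).getD 0 =
      (if (["learn", "how to", "tutorial", "guide"].any fun w => PySem.Str.isIn w cl) = true then 0
       else if (["funny", "comedy", "laugh", "joke"].any fun w => PySem.Str.isIn w cl) = true then 1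
       else if (["inspire", "motivate", "success", "dream"].any fun w => PySem.Str.isIn w cl) = true then 2
       else if (["story", "journey", "experience"].any fun w => PySem.Str.isIn w cl) = true then 3
       else 0) := by
  by_cases h0 : (["learn", "how to", "tutorial", "guide"].any fun w => PySem.Str.isIn w cl) = true
  · rw [if_pos h0]
    exact pvMinIs cl 0 ((mem_pvHits cl 0).2 (Or.inl ⟨rfl, h0⟩)) (fun c _ => Nat.zero_le c)
  · rw [if_neg h0]
    by_cases h1 : (["funny", "comedy", "laugh", "joke"].any fun w => PySem.Str.isIn w cl) = true
    · rw [if_pos h1]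
      refine pvMinIs cl 1 ((mem_pvHits cl 1).2 (Or.inr (Or.inl ⟨rfl, h1⟩))) ?_
      intro c hc
      rcases (mem_pvHits cl c).1 hc with ⟨h, hb⟩ | ⟨h, hb⟩ | ⟨h, hb⟩ | ⟨h, hb⟩ <;> subst h
      · exact absurd hb h0
      all_goals omega
    · rw [if_neg h1]
      by_cases h2 : (["inspire", "motivate", "success", "dream"].any fun w => PySem.Str.isIn w cl) = true
      · rw [if_pos h2]
        refine pvMinIs cl 2 ((mem_pvHits cl 2).2 (Or.inr (Or.inr (Or.inl ⟨rfl, h2⟩)))) ?_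
        intro c hc
        rcases (mem_pvHits cl c).1 hc with ⟨h, hb⟩ | ⟨h, hb⟩ | ⟨h, hb⟩ | ⟨h, hb⟩ <;> subst h
        · exact absurd hb h0
        · exact absurd hb h1
        all_goals omega
      · rw [if_neg h2]
        by_cases h3 : (["story", "journey", "experience"].any fun w => PySem.Str.isIn w cl) = true
        · rw [if_pos h3]
          refine pvMinIs cl 3 ((mem_pvHits cl 3).2 (Or.inr (Or.inr (Or.inr ⟨rfl, h3⟩)))) ?_
          intro c hc
          rcases (mem_pvHits cl c).1 hc with ⟨h, hb⟩ | ⟨h, hb⟩ | ⟨h, hb⟩ | ⟨h, hb⟩ <;> subst h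
          · exact absurd hb h0
          · exact absurd hb h1
          · exact absurd hb h2
          · omega
        · rw [if_neg h3]
          have he : pvHits cl = [] := by
            rw [List.eq_nil_iff_forall_not_mem]
            intro c hc
            rcases (mem_pvHits cl c).1 hc with ⟨_, hb⟩ | ⟨_, hb⟩ | ⟨_, hb⟩ | ⟨_, hb⟩
            · exact absurd hb h0
            · exact absurd hb h1
            · exact absurd hb h2
            · exact absurd hb h3
          rw [he]
          rfl

-- ===== VERDICT (by name: the statement is the Claim_ definition above) =====
theorem analyze_concept_py_spec : Claim_equal_analyze_concept_py := by
  intro concept _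
  unfold Spec_analyze_concept_py analyze_concept_py analyze_concept_py_alt
  simp only [cat_eq]
  by_cases h0 : (["learn", "how to", "tutorial", "guide"].any fun w => PySem.Str.isIn w (PySem.Str.lower concept)) = true <;>
  by_cases h1 : (["funny", "comedy", "laugh", "joke"].any fun w => PySem.Str.isIn w (PySem.Str.lower concept)) = true <;>
  by_cases h2 : (["inspire", "motivate", "success", "dream"].any fun w => PySem.Str.isIn w (PySem.Str.lower concept)) = true <;>
  by_cases h3 : (["story", "journey", "experience"].any fun w => PySem.Str.isIn w (PySem.Str.lower concept)) = true <;>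
  simp only [h0, h1, h2, h3] <;> rfl
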